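-- pv_equiv track=rewrite | github.com/Simon-LM/vox-refiner | src/subtitles.py | format_dialogue_preview
-- ===== SOURCE A (Python) =====
-- from typing import Dict, List, Optional
--
-- def format_dialogue_preview(segments: List[dict]) -> str:
--     """Return a readable dialogue transcript without timecodes, grouped by speaker."""
--     lines = []
--     prev_speaker = None
--     for seg in segments:
--         text = seg["text"].strip()
--         if not text:
--             continue
--         sid = seg.get("speaker_id")
--         if sid and sid != prev_speaker:
--             if lines:
--                 lines.append("")
--             lines.append(f"{sid}:")
--             prev_speaker = sid
--         lines.append(f"  {text}")
--     return "\n".join(lines).strip()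
-- ===== SOURCE B (Python) =====
-- def format_dialogue_preview(segments):
--     """Return a readable dialogue transcript without timecodes, grouped by speaker."""
--     # Pass 1: group consecutive non-empty texts into (speaker, texts) blocks.
--     blocks = []
--     for seg in segments:
--         text = seg["text"].strip()
--         if not text:
--             continue
--         sid = seg.get("speaker_id")
--         if sid and (not blocks or blocks[-1][0] != sid):
--             blocks.append((sid, [text]))
--         elif blocks:
--             blocks[-1][1].append(text)
--         else:
--             blocks.append((None, [text]))
--     # Pass 2: render the blocks into lines.
--     lines = []
--     for sp, texts in blocks:
--         if sp:
--             if lines: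
--                 lines.append("")
--             lines.append(f"{sp}:")
--         lines.extend("  " + t for t in texts)
--     return "\n".join(lines).strip()
-- ===== Notes on version B (the rewrite author's own statement) =====
-- stated objective: alternative
-- what changed: Replaces A's single state-machine loop (lines plus prev_speaker) by a two-pass decomposition: first fold the segments into (speaker, texts) blocks, then render the blocks into lines.
-- outside the precondition, e.g. on format_dialogue_preview([{'speaker_id': 'A'}]): A raises KeyError, B raises KeyError
import Mathlib
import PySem

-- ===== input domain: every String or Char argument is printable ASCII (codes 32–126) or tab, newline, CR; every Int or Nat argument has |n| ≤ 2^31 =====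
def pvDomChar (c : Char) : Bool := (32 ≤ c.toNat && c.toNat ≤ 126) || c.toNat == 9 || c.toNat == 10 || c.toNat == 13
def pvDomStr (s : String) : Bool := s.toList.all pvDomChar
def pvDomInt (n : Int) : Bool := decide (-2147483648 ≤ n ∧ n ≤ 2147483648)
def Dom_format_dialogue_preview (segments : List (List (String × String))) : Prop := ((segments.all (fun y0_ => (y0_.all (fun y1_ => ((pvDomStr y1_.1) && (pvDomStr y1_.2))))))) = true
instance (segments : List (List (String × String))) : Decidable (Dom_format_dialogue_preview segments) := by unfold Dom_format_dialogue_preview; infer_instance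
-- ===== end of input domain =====

-- B replaces A's one-pass state machine by a group-into-blocks pass followed by a render pass; same cost, different decomposition.

-- ===== PORT A =====
-- A's loop body: state = (lines, prev_speaker).  seg["text"] would raise KeyError on a
-- missing key; Pre_ excludes that, so the total form (get? …).getD "" is exact on Pre_.
def fdpAStep (st : List String × Option String) (seg : List (String × String)) :
    List String × Option String :=
  let text := PySem.Str.strip ((PySem.Dict.get? (PySem.Dict.mk seg) "text").getD "")
  if text = "" then st
  else
    match PySem.Dict.get? (PySem.Dict.mk seg) "speaker_id" with
    | some s =>
      -- `if sid and sid != prev_speaker` (sid truthy ⇔ present and nonempty)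
      if s ≠ "" ∧ some s ≠ st.2 then
        ((if st.1 ≠ [] then st.1 ++ [""] else st.1) ++ [s ++ ":", "  " ++ text], some s)
      else (st.1 ++ ["  " ++ text], st.2)
    | none => (st.1 ++ ["  " ++ text], st.2)

def format_dialogue_preview (segments : List (List (String × String))) : String :=
  PySem.Str.strip (PySem.Str.join "\n" (segments.foldl fdpAStep ([], none)).1)

-- ===== PORT B =====
-- blocks[-1][0] (speaker of the last block; none when there is no block)
def fdpLastSpeaker (blocks : List (Option String × List String)) : Option String :=
  blocks.getLast?.bind Prod.fst

-- `blocks[-1][1].append(text)`, creating an initial speakerless block if blocks is empty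
def fdpAppendLast (blocks : List (Option String × List String)) (t : String) :
    List (Option String × List String) :=
  match blocks.getLast? with
  | none => [(none, [t])]
  | some b => blocks.dropLast ++ [(b.1, b.2 ++ [t])]

-- pass 1 loop body (seg["text"] total via getD, exact under Pre_, as in port A)
def fdpGroup (blocks : List (Option String × List String)) (seg : List (String × String)) :
    List (Option String × List String) :=
  let text := PySem.Str.strip ((PySem.Dict.get? (PySem.Dict.mk seg) "text").getD "")
  if text = "" then blocks
  else
    match PySem.Dict.get? (PySem.Dict.mk seg) "speaker_id" with
    | some s =>
      if s ≠ "" ∧ (blocks = [] ∨ fdpLastSpeaker blocks ≠ some s) then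
        blocks ++ [(some s, [text])]
      else fdpAppendLast blocks text
    | none => fdpAppendLast blocks text

-- pass 2 loop body
def fdpRender (lines : List String) (b : Option String × List String) : List String :=
  let lines' := match b.1 with
    | some s => if s ≠ "" then (if lines ≠ [] then lines ++ [""] else lines) ++ [s ++ ":"]
                else lines
    | none => lines
  lines' ++ b.2.map (fun t => "  " ++ t)

def format_dialogue_preview_alt (segments : List (List (String × String))) : String :=
  PySem.Str.strip (PySem.Str.join "\n" ((segments.foldl fdpGroup []).foldl fdpRender []))

-- ===== PRECONDITION & SPEC =====
-- Pre_ excludes exactly the inputs where a segment lacks the "text" key: there both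
-- A and B raise KeyError at seg["text"].
def Pre_format_dialogue_preview (segments : List (List (String × String))) : Prop :=
  ∀ seg ∈ segments, PySem.Dict.get? (PySem.Dict.mk seg) "text" ≠ none
instance (segments : List (List (String × String))) : Decidable (Pre_format_dialogue_preview segments) := by unfold Pre_format_dialogue_preview; infer_instance

def pvWitness_format_dialogue_preview : (List (List (String × String))) :=
  [[("text", " hi "), ("speaker_id", "A")], [("text", "yo")]]

def Spec_format_dialogue_preview (segments : List (List (String × String))) (out : String) : Prop := out = format_dialogue_preview_alt segments
instance (segments : List (List (String × String))) (out : String) : Decidable (Spec_format_dialogue_preview segments out) := by unfold Spec_format_dialogue_preview; infer_instance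

-- ===== CLAIM (what is proved, stated in full; the proofs are below) =====
def Claim_equal_format_dialogue_preview : Prop := ∀ (segments : List (List (String × String))), Dom_format_dialogue_preview segments → Pre_format_dialogue_preview segments → Spec_format_dialogue_preview segments (format_dialogue_preview segments)

-- ===== LEMMAS AND PROOFS =====

theorem fdpLastSpeaker_concat (blocks : List (Option String × List String))
    (b : Option String × List String) : fdpLastSpeaker (blocks ++ [b]) = b.1 := by
  simp [fdpLastSpeaker]

theorem fdpLastSpeaker_appendLast (blocks : List (Option String × List String)) (t : String) :
    fdpLastSpeaker (fdpAppendLast blocks t) = fdpLastSpeaker blocks := by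
  induction blocks using List.reverseRecOn with
  | nil => simp [fdpAppendLast, fdpLastSpeaker]
  | append_singleton ys y _ => simp [fdpAppendLast, fdpLastSpeaker]

theorem fdpRender_appendLast (blocks : List (Option String × List String)) (t : String)
    (init : List String) :
    (fdpAppendLast blocks t).foldl fdpRender init
      = blocks.foldl fdpRender init ++ ["  " ++ t] := by
  induction blocks using List.reverseRecOn with
  | nil => simp [fdpAppendLast, fdpRender]
  | append_singleton ys y _ =>
    cases y with
    | mk sp ts =>
      cases sp with
      | none => simp [fdpAppendLast, fdpRender]
      | some s =>
        by_cases hs : s = "" <;> simp [fdpAppendLast, fdpRender, hs]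

theorem fdpKey (segs : List (List (String × String)))
    (blocks : List (Option String × List String)) :
    segs.foldl fdpAStep (blocks.foldl fdpRender [], fdpLastSpeaker blocks)
      = ((segs.foldl fdpGroup blocks).foldl fdpRender [],
         fdpLastSpeaker (segs.foldl fdpGroup blocks)) := by
  induction segs generalizing blocks with
  | nil => rfl
  | cons seg rest ih =>
    rw [List.foldl_cons, List.foldl_cons]
    have hstep : fdpAStep (blocks.foldl fdpRender [], fdpLastSpeaker blocks) seg
        = ((fdpGroup blocks seg).foldl fdpRender [], fdpLastSpeaker (fdpGroup blocks seg)) := by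
      simp only [fdpAStep, fdpGroup]
      by_cases ht : PySem.Str.strip ((PySem.Dict.get? (PySem.Dict.mk seg) "text").getD "") = ""
      · simp [ht]
      · simp only [ht, if_false]
        cases hsid : PySem.Dict.get? (PySem.Dict.mk seg) "speaker_id" with
        | none =>
          simp [fdpRender_appendLast, fdpLastSpeaker_appendLast]
        | some s =>
          by_cases hs : s = ""
          · have h1 : ¬ (s ≠ "" ∧ some s ≠ fdpLastSpeaker blocks) := by simp [hs]
            have h2 : ¬ (s ≠ "" ∧ (blocks = [] ∨ fdpLastSpeaker blocks ≠ some s)) := by simp [hs]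
            simp [h1, h2, fdpRender_appendLast, fdpLastSpeaker_appendLast]
          · by_cases hne : fdpLastSpeaker blocks = some s
            · have hb : blocks ≠ [] := by
                intro h; rw [h] at hne; simp [fdpLastSpeaker] at hne
              have h1 : ¬ (s ≠ "" ∧ some s ≠ fdpLastSpeaker blocks) := by simp [hne]
              have h2 : ¬ (s ≠ "" ∧ (blocks = [] ∨ fdpLastSpeaker blocks ≠ some s)) := by
                simp [hb, hne]
              simp [h1, h2, fdpRender_appendLast, fdpLastSpeaker_appendLast]
            · have h1 : (s ≠ "" ∧ some s ≠ fdpLastSpeaker blocks) :=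
                ⟨hs, fun h => hne h.symm⟩
              have h2 : (s ≠ "" ∧ (blocks = [] ∨ fdpLastSpeaker blocks ≠ some s)) :=
                ⟨hs, Or.inr hne⟩
              simp [h1, h2, fdpLastSpeaker_concat, fdpRender]
    rw [hstep, ih]

-- ===== VERDICT (by name: the statement is the Claim_ definition above) =====
theorem format_dialogue_preview_spec : Claim_equal_format_dialogue_preview := by
  intro segments _ _
  unfold Spec_format_dialogue_preview format_dialogue_preview format_dialogue_preview_alt
  have h := fdpKey segments []
  simp only [List.foldl_nil] at h
  have h0 : fdpLastSpeaker ([] : List (Option String × List String)) = none := rfl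
  rw [h0] at h
  rw [h]
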